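-- pv_equiv track=rewrite | github.com/edilainecguerra/Python_II | Semana_3.py | f
-- ===== SOURCE A (Python) =====
-- def f(v, i):
--     if i == 0:
--         return i
--     else:
--         j = f(v, i - 1)
--         if v[i] > v[j]:
--             return i
--         else:
--             return j
-- ===== SOURCE B (Python) =====
-- def f(v, i):
--     best = 0
--     for k in range(1, i + 1):
--         if v[k] > v[best]:
--             best = k
--     return best
-- ===== Notes on version B (the rewrite author's own statement) =====
-- stated objective: alternative
-- what changed: Replaces A's downward recursion on i (recursing to the prefix argmax, then comparing v[i]) with a single forward loop that maintains the running argmax index, keeping strict '>' so ties resolve to the earlier index.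
import Mathlib
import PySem

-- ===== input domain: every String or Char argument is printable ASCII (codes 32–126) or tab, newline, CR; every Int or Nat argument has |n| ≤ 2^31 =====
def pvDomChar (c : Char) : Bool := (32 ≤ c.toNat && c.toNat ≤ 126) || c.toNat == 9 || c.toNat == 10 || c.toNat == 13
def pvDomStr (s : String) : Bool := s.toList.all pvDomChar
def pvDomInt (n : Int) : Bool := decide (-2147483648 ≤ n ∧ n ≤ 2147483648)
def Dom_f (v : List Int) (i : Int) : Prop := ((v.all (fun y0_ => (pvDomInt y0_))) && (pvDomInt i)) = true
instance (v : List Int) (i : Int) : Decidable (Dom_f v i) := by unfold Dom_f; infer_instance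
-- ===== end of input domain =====

-- B replaces A's downward recursion by a single forward loop maintaining the running argmax (alternative decomposition, same cost).

-- ===== PORT A =====
-- A's recursion on i, counted down on i.toNat; none = Python error (IndexError / unbounded recursion), excluded by Pre_f.
def fRec (v : List Int) : Nat → Option Int
  | 0 => some 0
  | n + 1 =>
    match fRec v n with
    | none => none
    | some j =>
      match PySem.List.pyGet? v ((n : Int) + 1), PySem.List.pyGet? v j with
      | some vi, some vj => some (if vj < vi then (n : Int) + 1 else j)
      | _, _ => none

def f (v : List Int) (i : Int) : Int :=
  if i < 0 then 0 else (fRec v i.toNat).getD 0   -- i < 0: Python never returns (outside Pre_f)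

-- ===== PORT B =====
-- Source B: best = 0; for k in range(1, i+1): if v[k] > v[best]: best = k; return best
def fStep (v : List Int) (acc : Option Int) (k : Int) : Option Int :=
  match acc with
  | none => none
  | some best =>
    match PySem.List.pyGet? v k, PySem.List.pyGet? v best with
    | some a, some b => some (if b < a then k else best)
    | _, _ => none

def f_alt (v : List Int) (i : Int) : Int :=
  ((PySem.List.pyRange 1 (i + 1) 1).foldl (fStep v) (some 0)).getD 0

-- ===== PRECONDITION & SPEC =====
-- Pre_f: exactly where A returns: i = 0 (no indexing happens), or 0 ≤ i < len(v).
-- Negative i makes A recurse forever (RecursionError); i ≥ len(v) raises IndexError.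
def Pre_f (v : List Int) (i : Int) : Prop := 0 ≤ i ∧ (i = 0 ∨ i < (v.length : Int))
instance (v : List Int) (i : Int) : Decidable (Pre_f v i) := by unfold Pre_f; infer_instance
def pvWitness_f : List Int × Int := ([3, 7, 2], 2)

def Spec_f (v : List Int) (i : Int) (out : Int) : Prop := out = f_alt v i
instance (v : List Int) (i : Int) (out : Int) : Decidable (Spec_f v i out) := by unfold Spec_f; infer_instance

-- ===== CLAIM (what is proved, stated in full; the proofs are below) =====
def Claim_equal_f : Prop := ∀ (v : List Int) (i : Int), Dom_f v i → Pre_f v i → Spec_f v i (f v i)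

-- ===== LEMMAS AND PROOFS =====

lemma fRec_eq_foldl (v : List Int) (n : Nat) (h : n = 0 ∨ (n : Int) < (v.length : Int)) :
    fRec v n = (PySem.List.pyRange 1 ((n : Int) + 1) 1).foldl (fStep v) (some 0) := by
  induction n with
  | zero =>
    simp [fRec]
  | succ m ih =>
    have hm : m = 0 ∨ (m : Int) < (v.length : Int) := by
      rcases h with h | h
      · omega
      · right; push_cast at h ⊢; omega
    have hsplit : PySem.List.pyRange 1 (((m : Int) + 1) + 1) 1
        = PySem.List.pyRange 1 ((m : Int) + 1) 1 ++ [(m : Int) + 1] :=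
      PySem.List.pyRange_one_succ_right (by omega)
    have : ((m + 1 : Nat) : Int) + 1 = ((m : Int) + 1) + 1 := by push_cast; ring
    rw [this, hsplit, List.foldl_append, ← ih hm]
    cases h' : fRec v m with
    | none => simp [fRec, fStep, h']
    | some j => simp [fRec, fStep, h']

-- ===== VERDICT (by name: the statement is the Claim_ definition above) =====
theorem f_spec : Claim_equal_f := by
  intro v i _ hpre
  unfold Spec_f f f_alt
  have h0 : 0 ≤ i := hpre.1
  have hi : (i.toNat : Int) = i := Int.toNat_of_nonneg h0
  rw [if_neg (by omega)]
  rw [fRec_eq_foldl v i.toNat (by rcases hpre.2 with h | h <;> [left; right] <;> omega), hi]
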